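-- pv_equiv track=rewrite | github.com/KaH-KKH/yamk-thesis-enhanced | src/evaluators/metrics/rf_metrics.py | _count_test_cases
-- ===== SOURCE A (Python) =====
-- from typing import List, Dict, Any, Tuple
--
-- def _count_test_cases(lines: List[str]) -> int:
--     """Count number of test cases"""
--     in_test_section = False
--     test_count = 0
--
--     for line in lines:
--         if '*** Test Cases ***' in line:
--             in_test_section = True
--             continue
--         elif line.startswith('***') and in_test_section:
--             in_test_section = False
--             continue
--
--         if in_test_section and line.strip() and not line.startswith(' '):
--             test_count += 1
--
--     return test_count
-- ===== SOURCE B (Python) =====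
-- def _count_test_cases(lines):
--     """Count number of test cases"""
--     # Pass 1: split the file into the bodies of '*** Test Cases ***' sections.
--     blocks = []
--     cur = None
--     for line in lines:
--         if '*** Test Cases ***' in line:
--             cur = []
--             blocks.append(cur)
--         elif line.startswith('***'):
--             cur = None
--         elif cur is not None:
--             cur.append(line)
--     # Pass 2: count unindented non-blank lines in those bodies.
--     return sum(1 for block in blocks for line in block
--                if line.strip() and not line.startswith(' '))
-- ===== Notes on version B (the rewrite author's own statement) =====
-- stated objective: alternative
-- what changed: B replaces A's single flag-carrying counting loop by a two-phase decomposition: first split the lines into Test-Cases section bodies (blocks), then count the qualifying lines of all blocks in a separate pass.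
import Mathlib
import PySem

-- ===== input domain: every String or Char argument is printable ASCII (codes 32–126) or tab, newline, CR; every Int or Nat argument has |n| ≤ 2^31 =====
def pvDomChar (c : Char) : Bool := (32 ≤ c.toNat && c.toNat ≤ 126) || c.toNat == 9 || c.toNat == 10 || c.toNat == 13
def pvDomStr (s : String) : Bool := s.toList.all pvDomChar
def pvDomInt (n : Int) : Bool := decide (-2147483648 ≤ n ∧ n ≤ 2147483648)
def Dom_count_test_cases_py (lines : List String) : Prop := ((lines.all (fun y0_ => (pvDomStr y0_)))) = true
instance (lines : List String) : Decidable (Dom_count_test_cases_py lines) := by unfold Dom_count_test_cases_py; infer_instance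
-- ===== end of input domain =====

-- B splits the lines into Test-Cases section bodies first and counts them in a second pass,
-- replacing A's single flag-carrying loop (objective: alternative decomposition, same cost).


-- ===== PORT A =====
-- the body of A's for-loop, state = (in_test_section, test_count)
def pvAStep (st : Bool × Int) (line : String) : Bool × Int :=
  if PySem.Str.isIn "*** Test Cases ***" line then (true, st.2)
  else if PySem.Str.startswith line "***" && st.1 then (false, st.2)
  else if st.1 && !(PySem.Str.strip line == "") && !(PySem.Str.startswith line " ") then
    (st.1, st.2 + 1)
  else st

def count_test_cases_py (lines : List String) : Int :=
  (lines.foldl pvAStep (false, 0)).2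

-- ===== PORT B =====
-- the body of B's first loop; the open block `cur` is kept beside `blocks` and re-joined
-- when it is closed (modelling Python's mutation of the list already appended to `blocks`)
def pvBClose (blocks : List (List String)) (cur : Option (List String)) : List (List String) :=
  match cur with
  | some b => blocks ++ [b]
  | none => blocks

def pvBStep (st : List (List String) × Option (List String)) (line : String) :
    List (List String) × Option (List String) :=
  if PySem.Str.isIn "*** Test Cases ***" line then (pvBClose st.1 st.2, some [])
  else if PySem.Str.startswith line "***" then (pvBClose st.1 st.2, none)
  else match st.2 with
    | some b => (st.1, some (b ++ [line]))
    | none => st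

def count_test_cases_py_alt (lines : List String) : Int :=
  let st := lines.foldl pvBStep ([], none)
  let blocks := pvBClose st.1 st.2
  (((blocks.flatMap id).filter
      (fun line => !(PySem.Str.strip line == "") && !(PySem.Str.startswith line " "))).length : Int)

-- ===== PRECONDITION & SPEC =====
def Spec_count_test_cases_py (lines : List String) (out : Int) : Prop := out = count_test_cases_py_alt lines
instance (lines : List String) (out : Int) : Decidable (Spec_count_test_cases_py lines out) := by unfold Spec_count_test_cases_py; infer_instance

-- ===== CLAIM (what is proved, stated in full; the proofs are below) =====
def Claim_equal_count_test_cases_py : Prop := ∀ (lines : List String), Dom_count_test_cases_py lines → Spec_count_test_cases_py lines (count_test_cases_py lines)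

-- ===== LEMMAS AND PROOFS =====
def pvPred (line : String) : Bool :=
  !(PySem.Str.strip line == "") && !(PySem.Str.startswith line " ")

-- number of qualifying lines held by a B-state (closed blocks plus the open block)
def pvCount (blocks : List (List String)) (cur : Option (List String)) : Int :=
  (((blocks.flatMap id ++ cur.getD []).filter pvPred).length : Int)

theorem pvCount_close (blocks : List (List String)) (cur : Option (List String)) :
    pvCount (pvBClose blocks cur) none = pvCount blocks cur := by
  cases cur <;> simp [pvCount, pvBClose]

theorem pvCount_close_new (blocks : List (List String)) (cur : Option (List String)) :
    pvCount (pvBClose blocks cur) (some []) = pvCount blocks cur := by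
  cases cur <;> simp [pvCount, pvBClose]

theorem pvCount_snoc (blocks : List (List String)) (b : List String) (l : String) :
    pvCount blocks (some (b ++ [l])) =
      pvCount blocks (some b) + (if pvPred l then 1 else 0) := by
  cases h : pvPred l <;> simp [pvCount, List.filter_append, h] <;> ring

-- pvAStep with the branch on in_test_section normalised to the back
theorem pvAStep_eq (inSec : Bool) (cnt : Int) (l : String) :
    pvAStep (inSec, cnt) l =
      if PySem.Str.isIn "*** Test Cases ***" l then (true, cnt)
      else if PySem.Str.startswith l "***" then (false, cnt)
      else if inSec then (true, cnt + (if pvPred l then 1 else 0))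
      else (inSec, cnt) := by
  unfold pvAStep
  cases hI : PySem.Str.isIn "*** Test Cases ***" l
  · cases hS : PySem.Str.startswith l "***"
    · cases inSec
      · simp [hI, hS]
      · cases hT : pvPred l <;>
        · have hT' : (true && !(PySem.Str.strip l == "") && !(PySem.Str.startswith l " "))
              = pvPred l := by rw [Bool.true_and]; rfl
          simp only [hT']
          simp [hI, hS, hT]
    · cases inSec <;> simp [hI, hS]
  · simp [hI]

theorem pvLoop_eq (rest : List String) :
    ∀ (inSec : Bool) (cnt : Int) (blocks : List (List String)) (cur : Option (List String)),
    inSec = cur.isSome →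
    (List.foldl pvAStep (inSec, cnt) rest).2 + pvCount blocks cur
      = cnt + pvCount (List.foldl pvBStep (blocks, cur) rest).1
                      (List.foldl pvBStep (blocks, cur) rest).2 := by
  induction rest with
  | nil => intro inSec cnt blocks cur _; simp
  | cons l rest ih =>
    intro inSec cnt blocks cur hflag
    simp only [List.foldl_cons, pvAStep_eq]
    cases hI : PySem.Str.isIn "*** Test Cases ***" l
    · cases hS : PySem.Str.startswith l "***"
      · -- ordinary body line
        cases cur with
        | none =>
          have hf : inSec = false := by simp [hflag]
          simp only [hI, hS, hf, pvBStep, Bool.false_eq_true, if_false]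
          exact ih false cnt blocks none rfl
        | some b =>
          have hf : inSec = true := by simp [hflag]
          simp only [hI, hS, hf, pvBStep, Bool.false_eq_true, if_false, if_true]
          have := ih true (cnt + (if pvPred l then 1 else 0)) blocks (some (b ++ [l])) rfl
          rw [pvCount_snoc] at this
          omega
      · -- other header line: section (if any) closes
        simp only [hI, hS, pvBStep, Bool.false_eq_true, if_false, if_true]
        have := ih false cnt (pvBClose blocks cur) none rfl
        rw [pvCount_close] at this
        omega
    · -- Test Cases header: a fresh section opens
      simp only [hI, pvBStep, if_true]
      have := ih true cnt (pvBClose blocks cur) (some []) rfl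
      rw [pvCount_close_new] at this
      omega

-- ===== VERDICT (by name: the statement is the Claim_ definition above) =====
theorem count_test_cases_py_spec : Claim_equal_count_test_cases_py := by
  intro lines _
  unfold Spec_count_test_cases_py count_test_cases_py
  have h := pvLoop_eq lines false 0 [] none rfl
  have h0 : pvCount [] none = 0 := by simp [pvCount]
  rw [h0] at h
  have hfin : count_test_cases_py_alt lines
      = pvCount (List.foldl pvBStep ([], none) lines).1 (List.foldl pvBStep ([], none) lines).2 := by
    rw [← pvCount_close]
    simp only [count_test_cases_py_alt, pvCount, Option.getD_none, List.append_nil]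
    rfl
  rw [hfin]
  omega
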